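-- pv_equiv track=rewrite | github.com/belalakhter/smart_research_agent | app/api/endpoints/chat.py | _preview
-- ===== SOURCE A (Python) =====
-- def _preview(messages):
--     if not messages:
--         return "No messages yet"
--     user_msgs = [m for m in messages if m.get("role") == "user"]
--     if not user_msgs:
--         return "No messages yet"
--     raw = user_msgs[-1].get("content", "")
--     return raw[:40] + ("…" if len(raw) > 40 else "")
-- ===== SOURCE B (Python) =====
-- def _preview(messages):
--     for m in reversed(messages):
--         if m.get("role") == "user":
--             raw = m.get("content", "")
--             return raw[:40] + ("…" if len(raw) > 40 else "")
--     return "No messages yet"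
-- ===== Notes on version B (the rewrite author's own statement) =====
-- stated objective: simpler
-- what changed: Replaces the full filter-then-index-[-1] pass with a single early-terminating reverse scan that returns at the first user message, with the no-user fall-through also covering the empty list.
import Mathlib
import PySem

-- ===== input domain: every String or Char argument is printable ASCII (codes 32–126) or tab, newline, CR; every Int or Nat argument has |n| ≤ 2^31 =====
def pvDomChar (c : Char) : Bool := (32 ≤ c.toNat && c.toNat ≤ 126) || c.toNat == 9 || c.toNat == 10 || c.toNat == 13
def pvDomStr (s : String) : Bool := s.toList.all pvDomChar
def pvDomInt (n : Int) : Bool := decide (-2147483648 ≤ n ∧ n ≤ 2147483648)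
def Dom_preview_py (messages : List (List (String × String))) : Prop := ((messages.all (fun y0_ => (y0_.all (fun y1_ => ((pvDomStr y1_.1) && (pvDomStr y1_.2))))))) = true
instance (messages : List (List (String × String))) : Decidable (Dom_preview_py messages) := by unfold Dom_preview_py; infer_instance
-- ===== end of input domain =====

-- B replaces A's filter-then-last-index pass by a single early-terminating reverse scan (simpler decomposition; same cost).

-- ===== PORT A =====
def preview_py (messages : List (List (String × String))) : String :=
  if messages = [] then "No messages yet"
  else
    let user_msgs := messages.filter (fun m => (PySem.Dict.mk m).get? "role" == some "user")
    if user_msgs = [] then "No messages yet"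
    else
      let raw := PySem.Dict.getD (PySem.Dict.mk (PySem.List.pyGetD user_msgs (-1) [])) "content" ""
      String.ofList (PySem.Chars.slice raw.toList none (some 40) ++
        (if PySem.Str.len raw > 40 then "…".toList else []))

-- ===== PORT B =====
-- reverse scan: first user message of the reversed list wins; fall-through is the sentinel
def previewScan : List (List (String × String)) → String
  | [] => "No messages yet"
  | m :: rest =>
    if (PySem.Dict.mk m).get? "role" == some "user" then
      let raw := PySem.Dict.getD (PySem.Dict.mk m) "content" ""
      String.ofList (PySem.Chars.slice raw.toList none (some 40) ++
        (if PySem.Str.len raw > 40 then "…".toList else []))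
    else previewScan rest

def preview_py_alt (messages : List (List (String × String))) : String :=
  previewScan messages.reverse

-- ===== PRECONDITION & SPEC =====
def Spec_preview_py (messages : List (List (String × String))) (out : String) : Prop := out = preview_py_alt messages
instance (messages : List (List (String × String))) (out : String) : Decidable (Spec_preview_py messages out) := by unfold Spec_preview_py; infer_instance

-- ===== CLAIM (what is proved, stated in full; the proofs are below) =====
def Claim_equal_preview_py : Prop := ∀ (messages : List (List (String × String))), Dom_preview_py messages → Spec_preview_py messages (preview_py messages)

-- ===== LEMMAS AND PROOFS =====

def pvTrunc (m : List (String × String)) : String :=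
  let raw := PySem.Dict.getD (PySem.Dict.mk m) "content" ""
  String.ofList (PySem.Chars.slice raw.toList none (some 40) ++
    (if PySem.Str.len raw > 40 then "…".toList else []))

def pvIsUser (m : List (String × String)) : Bool :=
  (PySem.Dict.mk m).get? "role" == some "user"

lemma previewScan_eq_head_filter (L : List (List (String × String))) :
    previewScan L = ((L.filter pvIsUser).head?.map pvTrunc).getD "No messages yet" := by
  induction L with
  | nil => rfl
  | cons m rest ih =>
    by_cases h : pvIsUser m = true
    · simp only [previewScan, pvIsUser] at h ⊢
      simp [h, pvIsUser, pvTrunc]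
    · simp only [previewScan, pvIsUser] at h ⊢
      simp [h, pvIsUser, ih]

-- ===== VERDICT (by name: the statement is the Claim_ definition above) =====
theorem preview_py_spec : Claim_equal_preview_py := by
  intro messages _
  unfold Spec_preview_py preview_py preview_py_alt
  rw [previewScan_eq_head_filter, List.filter_reverse]
  by_cases hm : messages = []
  · subst hm; rfl
  · simp only [hm, if_false]
    set u := messages.filter (fun m => (PySem.Dict.mk m).get? "role" == some "user") with hu
    have hupv : u = messages.filter pvIsUser := hu
    by_cases h : u = []
    · rw [← hupv, h]; rfl
    · rw [← hupv]
      simp only [h, if_false]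
      rw [PySem.List.pyGetD_neg_one u [] h]
      rw [List.head?_reverse, List.getLast?_eq_some_getLast h]
      rfl
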